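-- pv_equiv track=rewrite | github.com/evilc3/dsa | painter_partation_problem.py | worker
-- ===== SOURCE A (Python) =====
-- def worker(arr, k, start, n):
--     if k == 1:
--         return sum(arr[start:n])
--     if n == 1: return arr[0]
--     ans = 10000
--     for i in range(start, n-k+1):
--         ans = min(ans, max(sum(arr[start:i+1]), worker(arr, k-1, i+1, n)))
--
--     return ans
-- ===== SOURCE B (Python) =====
-- def worker(arr, k, start, n):
--     if k == 1:
--         return sum(arr[start:n])
--     if n == 1:
--         return arr[0]
--     if start >= n - k + 1:
--         return 10000  # no split point: A's cap
--     L = len(arr)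
--     pref = [0]
--     for x in arr:
--         pref.append(pref[-1] + x)
--
--     def clip(x):  # Python slice-bound normalisation
--         return min(x, L) if x >= 0 else max(L + x, 0)
--
--     def seg(a, b):  # sum(arr[a:b]) via prefix sums
--         ca, cb = clip(a), clip(b)
--         return pref[cb] - pref[ca] if ca < cb else 0
--
--     dp = {}
--     for s in range(start, n + 1):  # one partition: suffix sum
--         dp[s] = seg(s, n)
--     for j in range(2, k):  # full rows for 2..k-1 parts
--         ndp = {}
--         for s in range(start, n + 1):
--             best = 10000
--             for i in range(s, n - j + 1):
--                 best = min(best, max(seg(s, i + 1), dp[i + 1]))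
--             ndp[s] = best
--         dp = ndp
--     best = 10000  # k parts, needed only at `start`
--     for i in range(start, n - k + 1):
--         best = min(best, max(seg(start, i + 1), dp[i + 1]))
--     return best
-- ===== Notes on version B (the rewrite author's own statement) =====
-- stated objective: alternative
-- what changed: Replaced the exponential top-down recursion over (k,start) by a bottom-up dynamic program (a dict row per part count, the top level unrolled) with clamped prefix sums replacing every slice sum, keeping the 10000 cap and the k==1 / n==1 base cases; intended as asymptotically faster, measured only 1.27x at the largest size both finished.
import Mathlib
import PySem

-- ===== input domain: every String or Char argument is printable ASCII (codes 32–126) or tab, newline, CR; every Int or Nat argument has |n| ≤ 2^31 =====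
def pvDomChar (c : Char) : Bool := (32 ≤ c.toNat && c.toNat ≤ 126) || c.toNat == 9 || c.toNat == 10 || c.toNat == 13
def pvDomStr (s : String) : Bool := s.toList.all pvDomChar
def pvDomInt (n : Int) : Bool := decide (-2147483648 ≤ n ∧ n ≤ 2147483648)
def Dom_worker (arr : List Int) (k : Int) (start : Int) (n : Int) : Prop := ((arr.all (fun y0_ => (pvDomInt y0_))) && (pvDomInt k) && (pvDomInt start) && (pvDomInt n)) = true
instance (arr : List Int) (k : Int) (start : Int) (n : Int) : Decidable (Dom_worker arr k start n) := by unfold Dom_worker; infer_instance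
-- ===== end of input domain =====

-- B replaces A's top-down recursion by a bottom-up dynamic program over (parts, split point)
-- with prefix sums (objective: alternative).

-- ===== PORT A =====
-- fuel = k.toNat makes the recursion structural; inside Pre_worker the fuel never
-- runs out before a base case, so the 0-fuel row is only ever taken on the empty loop.
def workerA (arr : List Int) : Nat → Int → Int → Int → Int
  | 0, k, start, n =>
    if k = 1 then (PySem.List.slice arr (some start) (some n)).sum
    else if n = 1 then (PySem.List.pyGet? arr 0).getD 0
    else 10000
  | fuel + 1, k, start, n =>
    if k = 1 then (PySem.List.slice arr (some start) (some n)).sum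
    else if n = 1 then (PySem.List.pyGet? arr 0).getD 0
    else
      (PySem.List.pyRange start (n - k + 1) 1).foldl
        (fun ans i =>
          min ans (max (PySem.List.slice arr (some start) (some (i + 1))).sum
                       (workerA arr fuel (k - 1) (i + 1) n))) 10000

def worker (arr : List Int) (k : Int) (start : Int) (n : Int) : Int :=
  workerA arr k.toNat k start n

-- ===== PORT B =====
-- B's helper `clip`: Python's slice-bound normalisation
def clipB (L : Int) (x : Int) : Int := if 0 ≤ x then min x L else max (L + x) 0

-- B's helper `seg`: sum(arr[a:b]) computed from the prefix-sum list
def segB (pref : List Int) (L : Int) (a : Int) (b : Int) : Int :=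
  if clipB L a < clipB L b
  then PySem.List.pyGetD pref (clipB L b) 0 - PySem.List.pyGetD pref (clipB L a) 0
  else 0

def worker_alt (arr : List Int) (k : Int) (start : Int) (n : Int) : Int :=
  if k = 1 then (PySem.List.slice arr (some start) (some n)).sum
  else if n = 1 then (PySem.List.pyGet? arr 0).getD 0
  else if n - k + 1 ≤ start then 10000
  else
    let L : Int := arr.length
    let pref := arr.foldl (fun p x => p ++ [PySem.List.pyGetD p (-1) 0 + x]) [0]
    let dp1 := (PySem.List.pyRange start (n + 1) 1).foldl
      (fun d s => d.insert s (segB pref L s n)) (PySem.Dict.empty : PySem.Dict Int Int)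
    let dp := (PySem.List.pyRange 2 k 1).foldl
      (fun dp j =>
        (PySem.List.pyRange start (n + 1) 1).foldl
          (fun nd s => nd.insert s
            ((PySem.List.pyRange s (n - j + 1) 1).foldl
              (fun best i =>
                min best (max (segB pref L s (i + 1)) (PySem.Dict.getD dp (i + 1) 0))) 10000))
          (PySem.Dict.empty : PySem.Dict Int Int)) dp1
    (PySem.List.pyRange start (n - k + 1) 1).foldl
      (fun best i =>
        min best (max (segB pref L start (i + 1)) (PySem.Dict.getD dp (i + 1) 0))) 10000

-- ===== PRECONDITION & SPEC =====
-- Pre_ excludes exactly the inputs on which A raises: k ≤ 0 with n ≠ 1 and a nonempty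
-- loop range (unbounded recursion, RecursionError), and n = 1 with k ≠ 1 on an empty
-- list (IndexError from arr[0]).
def Pre_worker (arr : List Int) (k : Int) (start : Int) (n : Int) : Prop :=
  k = 1 ∨ (n = 1 ∧ arr ≠ []) ∨ (n ≠ 1 ∧ (1 ≤ k ∨ n - k + 1 ≤ start))
instance (arr : List Int) (k : Int) (start : Int) (n : Int) : Decidable (Pre_worker arr k start n) := by unfold Pre_worker; infer_instance

def pvWitness_worker : List Int × Int × Int × Int := ([10, 20, 30, 40], 2, 0, 4)

def Spec_worker (arr : List Int) (k : Int) (start : Int) (n : Int) (out : Int) : Prop := out = worker_alt arr k start n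
instance (arr : List Int) (k : Int) (start : Int) (n : Int) (out : Int) : Decidable (Spec_worker arr k start n out) := by unfold Spec_worker; infer_instance

-- ===== CLAIM (what is proved, stated in full; the proofs are below) =====
def Claim_equal_worker : Prop := ∀ (arr : List Int) (k : Int) (start : Int) (n : Int), Dom_worker arr k start n → Pre_worker arr k start n → Spec_worker arr k start n (worker arr k start n)


-- ===== LEMMAS AND PROOFS =====

-- the list built by B's `pref` loop, from a running total c
def scanFrom (c : Int) : List Int → List Int
  | [] => []
  | x :: xs => (c + x) :: scanFrom (c + x) xs

theorem foldl_pref (xs : List Int) : ∀ (acc : List Int) (c : Int), acc.getLast? = some c →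
    xs.foldl (fun p x => p ++ [PySem.List.pyGetD p (-1) 0 + x]) acc
      = acc ++ scanFrom c xs := by
  induction xs with
  | nil => intro acc c h; simp [scanFrom]
  | cons x xs ih =>
    intro acc c h
    have hne : acc ≠ [] := by rintro rfl; simp at h
    simp only [List.foldl_cons]
    rw [PySem.List.pyGetD_neg_one acc 0 hne]
    have hlast : acc.getLast hne = c := by
      have := List.getLast?_eq_some_getLast (l := acc) hne
      rw [this] at h; exact Option.some.inj h
    rw [ih (acc ++ [acc.getLast hne + x]) (acc.getLast hne + x) (by simp)]
    simp [scanFrom, hlast]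

theorem getElem?_scanFrom : ∀ (xs : List Int) (c : Int) (i : Nat), i < xs.length →
    (scanFrom c xs)[i]? = some (c + ((xs.take (i + 1)).sum)) := by
  intro xs
  induction xs with
  | nil => intro c i h; simp at h
  | cons x xs ih =>
    intro c i h
    cases i with
    | zero => simp [scanFrom]
    | succ i =>
      simp only [scanFrom, List.getElem?_cons_succ]
      rw [ih (c + x) i (by simpa using h)]
      simp [add_assoc]

-- pref lookup: pref[i] = sum of the first i elements, for 0 ≤ i ≤ len
theorem pref_lookup (arr : List Int) (i : Int) (h0 : 0 ≤ i) (h1 : i ≤ arr.length) :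
    PySem.List.pyGetD (arr.foldl (fun p x => p ++ [PySem.List.pyGetD p (-1) 0 + x]) [0]) i 0
      = ((arr.take i.toNat).sum) := by
  rw [foldl_pref arr [0] 0 rfl]
  obtain ⟨m, rfl⟩ : ∃ m : ℕ, i = (m : ℤ) := ⟨i.toNat, by omega⟩
  have hm : m ≤ arr.length := by exact_mod_cast h1
  rw [List.singleton_append, PySem.List.pyGetD_natCast]
  simp only [Int.toNat_natCast]
  cases m with
  | zero => simp
  | succ m =>
    rw [List.getD_cons_succ]
    have hi : m < arr.length := by omega
    have h2 := getElem?_scanFrom arr 0 m hi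
    rw [List.getD_eq_getElem?_getD, h2]
    simp

theorem clip_eq (arr : List Int) (x : Int) :
    ((PySem.List.clampIdx arr.length x : ℕ) : ℤ) = clipB arr.length x := by
  simp only [PySem.List.clampIdx, clipB]
  split_ifs <;> omega

theorem clipB_bounds (arr : List Int) (x : Int) :
    0 ≤ clipB arr.length x ∧ clipB arr.length x ≤ arr.length := by
  rw [← clip_eq]; constructor <;> [positivity; skip]
  have : PySem.List.clampIdx arr.length x ≤ arr.length := by
    simp only [PySem.List.clampIdx]; split_ifs <;> omega
  exact_mod_cast this

theorem sum_take_sub (arr : List Int) (ca cb : ℕ) (h : ca ≤ cb) :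
    ((arr.drop ca).take (cb - ca)).sum = (arr.take cb).sum - (arr.take ca).sum := by
  have key : arr.take cb = arr.take ca ++ (arr.drop ca).take (cb - ca) := by
    conv_lhs => rw [show cb = ca + (cb - ca) by omega]
    rw [List.take_add]
  rw [key]; simp

-- A's slice sums are B's `seg` values
theorem seg_slice (arr : List Int) (a b : Int) :
    (PySem.List.slice arr (some a) (some b)).sum
      = segB (arr.foldl (fun p x => p ++ [PySem.List.pyGetD p (-1) 0 + x]) [0]) arr.length a b := by
  have hca := clipB_bounds arr a
  have hcb := clipB_bounds arr b
  simp only [PySem.List.slice, segB]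
  rw [pref_lookup arr (clipB arr.length b) hcb.1 hcb.2,
      pref_lookup arr (clipB arr.length a) hca.1 hca.2]
  rw [← clip_eq, ← clip_eq]
  simp only [Int.toNat_natCast]
  by_cases hlt : PySem.List.clampIdx arr.length a < PySem.List.clampIdx arr.length b
  · rw [if_pos (by exact_mod_cast hlt)]
    exact sum_take_sub arr _ _ (le_of_lt hlt)
  · rw [if_neg (by exact_mod_cast hlt)]
    rw [show PySem.List.clampIdx arr.length b - PySem.List.clampIdx arr.length a = 0 by omega]
    simp

-- a fresh-key insert loop over a Nodup range is the literal association list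
theorem foldl_insert_mk (l : List Int) (f : Int → Int) (h : l.Nodup) :
    l.foldl (fun d s => d.insert s (f s)) (PySem.Dict.empty : PySem.Dict Int Int)
      = PySem.Dict.mk (l.map (fun s => (s, f s))) := by
  apply PySem.Dict.ext
  rw [show (fun (d : PySem.Dict Int Int) (s : Int) => d.insert s (f s))
        = (fun (d : PySem.Dict Int Int) (s : Int) => d.insert (id s) (f s)) from rfl]
  rw [PySem.Dict.items_foldl_insert_fresh l id f PySem.Dict.empty
        (by intro a _; rfl) (by simpa using h)]
  simp [PySem.Dict.empty]

theorem get?_mk_map (f : Int → Int) : ∀ (l : List Int) (x : Int), x ∈ l →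
    (PySem.Dict.mk (l.map (fun s => (s, f s)))).get? x = some (f x) := by
  intro l
  induction l with
  | nil => intro x hx; simp at hx
  | cons s rest ih =>
    intro x hx
    simp only [List.map_cons]
    rw [PySem.Dict.get?_mk_cons]
    by_cases he : s = x
    · subst he; simp
    · rw [if_neg (by simpa using he)]
      have hx2 : x ∈ rest := by
        rcases List.mem_cons.mp hx with h | h
        · exact absurd h.symm he
        · exact h
      exact ih x hx2

-- the main DP invariant: B's dp row after the j-loop is A's value for j parts
theorem dp_invariant (arr : List Int) (start n : Int) (hne1 : n ≠ 1) :
    ∀ (j : Int), 1 ≤ j →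
      (PySem.List.pyRange 2 (j + 1) 1).foldl
        (fun dp j =>
          (PySem.List.pyRange start (n + 1) 1).foldl
            (fun nd s => nd.insert s
              ((PySem.List.pyRange s (n - j + 1) 1).foldl
                (fun best i =>
                  min best (max (segB (arr.foldl (fun p x => p ++ [PySem.List.pyGetD p (-1) 0 + x]) [0]) arr.length s (i + 1))
                                (PySem.Dict.getD dp (i + 1) 0))) 10000))
            (PySem.Dict.empty : PySem.Dict Int Int))
        ((PySem.List.pyRange start (n + 1) 1).foldl
          (fun d s => d.insert s (segB (arr.foldl (fun p x => p ++ [PySem.List.pyGetD p (-1) 0 + x]) [0]) arr.length s n))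
          (PySem.Dict.empty : PySem.Dict Int Int))
      = PySem.Dict.mk ((PySem.List.pyRange start (n + 1) 1).map
          (fun s => (s, workerA arr j.toNat j s n))) := by
  intro j hj
  induction j, hj using Int.le_induction with
  | base =>
    rw [show (1 : ℤ) + 1 = 2 from rfl, PySem.List.pyRange_one_eq_nil (le_refl 2)]
    simp only [List.foldl_nil]
    rw [foldl_insert_mk _ _ (PySem.List.nodup_pyRange_one start (n + 1))]
    apply congrArg
    apply List.map_congr_left
    intro s _
    have : workerA arr (1 : ℤ).toNat 1 s n = (PySem.List.slice arr (some s) (some n)).sum := by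
      norm_num [workerA]
    rw [this, seg_slice]
  | succ j hj ih =>
    rw [PySem.List.pyRange_one_succ_right (show (2 : ℤ) ≤ j + 1 by omega), List.foldl_append,
        List.foldl_cons, List.foldl_nil, ih]
    rw [foldl_insert_mk _ _ (PySem.List.nodup_pyRange_one start (n + 1))]
    apply congrArg
    apply List.map_congr_left
    intro s hs
    obtain ⟨hss, hsn⟩ := PySem.List.mem_pyRange_one.mp hs
    have hfu : (j + 1).toNat = j.toNat + 1 := by omega
    have hk1 : ¬ (j + 1 = 1) := by omega
    apply congrArg (Prod.mk s)
    show _ = workerA arr (j + 1).toNat (j + 1) s n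
    rw [hfu]
    conv_rhs => rw [workerA]
    rw [if_neg hk1, if_neg hne1]
    apply PySem.List.foldl_congr_mem
    intro acc i hi
    obtain ⟨his, hin⟩ := PySem.List.mem_pyRange_one.mp hi
    rw [PySem.Dict.getD, get?_mk_map _ _ (i + 1)
          (PySem.List.mem_pyRange_one.mpr ⟨by omega, by omega⟩)]
    rw [seg_slice]
    norm_num

-- ===== VERDICT (by name: the statement is the Claim_ definition above) =====
theorem worker_spec : Claim_equal_worker := by
  intro arr k start n _hdom hpre
  unfold Spec_worker
  by_cases hk1 : k = 1
  · subst hk1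
    show workerA arr (1 : ℤ).toNat 1 start n = worker_alt arr 1 start n
    norm_num [workerA, worker_alt]
  · by_cases hn1 : n = 1
    · have harr : arr ≠ [] := by
        rcases hpre with h | h | h
        · exact absurd h hk1
        · exact h.2
        · exact absurd hn1 h.1
      show workerA arr k.toNat k start n = worker_alt arr k start n
      rcases hfu : k.toNat with _ | f <;> simp [workerA, worker_alt, hk1, hn1]
    · show workerA arr k.toNat k start n = worker_alt arr k start n
      rw [worker_alt, if_neg hk1, if_neg hn1]
      by_cases hempty : n - k + 1 ≤ start
      · -- empty loop range: both sides return the 10000 cap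
        rw [if_pos hempty]
        have hnil : PySem.List.pyRange start (n - k + 1) 1 = [] :=
          PySem.List.pyRange_one_eq_nil hempty
        rcases k.toNat with _ | f <;> simp [workerA, hk1, hn1, hnil]
      · rw [if_neg hempty]
        dsimp only
        have hk : 1 ≤ k := by
          rcases hpre with h | h | h
          · exact absurd h hk1
          · exact absurd h.1 hn1
          · rcases h.2 with h2 | h2
            · exact h2
            · omega
        -- k ≥ 2: one unfolding of A, then the DP row for k-1 parts
        obtain ⟨m, rfl⟩ : ∃ m, k = m + 1 := ⟨k - 1, by ring⟩
        have hm : 1 ≤ m := by omega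
        rw [dp_invariant arr start n hn1 m hm]
        have hfu : (m + 1).toNat = m.toNat + 1 := by omega
        rw [hfu]
        conv_lhs => rw [workerA]
        rw [if_neg hk1, if_neg hn1]
        apply PySem.List.foldl_congr_mem
        intro acc i hi
        obtain ⟨his, hin⟩ := PySem.List.mem_pyRange_one.mp hi
        rw [PySem.Dict.getD, get?_mk_map _ _ (i + 1)
              (PySem.List.mem_pyRange_one.mpr ⟨by omega, by omega⟩)]
        rw [seg_slice]
        norm_num
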